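-- pv_equiv track=rewrite | github.com/threefoldtech/js-ng | jumpscale/data/platform/__init__.py | _args2cmd
-- ===== SOURCE A (Python) =====
-- def _args2cmd(args, sep=" "):
--     # see strutils
--     result = []
--     needquote = False
--     for arg in args:
--         bs_buf = []
--
--         # Add a space to separate this argument from the others
--         if result:
--             result.append(" ")
--
--         needquote = (" " in arg) or ("\t" in arg) or not arg
--         if needquote:
--             result.append('"')
--
--         for c in arg:
--             if c == "\\":
--                 # Don't know if we need to double yet.
--                 bs_buf.append(c)
--             elif c == '"':
--                 # Double backslashes.
--                 result.append("\\" * len(bs_buf) * 2)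
--                 bs_buf = []
--                 result.append('\\"')
--             else:
--                 # Normal char
--                 if bs_buf:
--                     result.extend(bs_buf)
--                     bs_buf = []
--                 result.append(c)
--
--         # Add remaining backslashes, if any.
--         if bs_buf:
--             result.extend(bs_buf)
--
--         if needquote:
--             result.extend(bs_buf)
--             result.append('"')
--
--     return "".join(result)
-- ===== SOURCE B (Python) =====
-- def _args2cmd(args, sep=" "):
--     # Quote each argument independently with a single right-to-left scan
--     # (a "doubling" flag replaces A's backslash buffer), then join with spaces.
--     def _quote(arg):
--         needquote = (" " in arg) or ("\t" in arg) or not arg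
--         pieces = []
--         doubling = needquote
--         for c in reversed(arg):
--             if c == '"':
--                 pieces.append('\\"')
--                 doubling = True
--             elif c == "\\":
--                 pieces.append("\\\\" if doubling else "\\")
--             else:
--                 pieces.append(c)
--                 doubling = False
--         body = "".join(reversed(pieces))
--         return '"' + body + '"' if needquote else body
--     return " ".join(_quote(a) for a in args)
-- ===== Notes on version B (the rewrite author's own statement) =====
-- stated objective: alternative
-- what changed: B quotes each argument independently with a single right-to-left scan that uses a boolean 'doubling' flag (backslashes are doubled only while a quote or the quoted end lies to the right) and joins the tokens with ' '.join, replacing A's forward scan with an explicit backslash buffer and a single shared result list.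
import Mathlib
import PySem

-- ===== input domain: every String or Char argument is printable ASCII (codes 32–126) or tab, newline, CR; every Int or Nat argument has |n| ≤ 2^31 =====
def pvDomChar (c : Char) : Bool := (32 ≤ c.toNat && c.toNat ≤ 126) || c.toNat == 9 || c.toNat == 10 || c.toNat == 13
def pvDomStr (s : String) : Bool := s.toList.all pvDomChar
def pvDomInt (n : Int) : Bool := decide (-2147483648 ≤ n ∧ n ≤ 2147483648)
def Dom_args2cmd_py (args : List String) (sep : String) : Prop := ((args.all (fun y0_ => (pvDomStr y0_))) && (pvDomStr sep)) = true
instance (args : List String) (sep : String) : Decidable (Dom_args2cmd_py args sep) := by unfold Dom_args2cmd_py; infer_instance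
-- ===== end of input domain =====

-- B quotes each argument independently by a single right-to-left scan with a "doubling"
-- flag (instead of A's forward scan with a backslash buffer) and joins with spaces;
-- objective: alternative structure, same behaviour. Both ignore `sep`, as the Python does.

-- ===== PORT A =====
-- inner char loop of _args2cmd: result and bs_buf accumulators ('" " in arg' on a
-- single-character needle is exactly character membership, exact on this domain)
def aInner : List Char → List Char → List Char → List Char × List Char
  | [], result, bs => (result, bs)
  | c :: cs, result, bs =>
    if c = '\\' then
      aInner cs result (bs ++ ['\\'])
    else if c = '"' then
      aInner cs (result ++ List.replicate (bs.length * 2) '\\' ++ ['\\', '"']) []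
    else
      aInner cs ((if bs.isEmpty then result else result ++ bs) ++ [c]) []

def aOuter : List String → List Char → List Char
  | [], result => result
  | arg :: rest, result =>
    let result := if result.isEmpty then result else result ++ [' ']
    let cs := arg.toList
    let needquote := cs.contains ' ' || cs.contains '\t' || cs.isEmpty
    let result := if needquote then result ++ ['"'] else result
    let p := aInner cs result []
    let result := if p.2.isEmpty then p.1 else p.1 ++ p.2
    let result := if needquote then result ++ p.2 ++ ['"'] else result
    aOuter rest result

def args2cmd_py (args : List String) (sep : String) : String :=
  String.ofList (aOuter args [])

-- ===== PORT B =====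
-- backward scan over reversed(arg); pieces are appended and the list reversed at the end
def bLoop : List Char → List (List Char) → Bool → List (List Char)
  | [], pieces, _ => pieces
  | c :: r, pieces, d =>
    if c = '"' then bLoop r (pieces ++ [['\\', '"']]) true
    else if c = '\\' then bLoop r (pieces ++ [if d then ['\\', '\\'] else ['\\']]) d
    else bLoop r (pieces ++ [[c]]) false

def bQuote (cs : List Char) : List Char :=
  let needquote := cs.contains ' ' || cs.contains '\t' || cs.isEmpty
  let body := (bLoop cs.reverse [] needquote).reverse.flatten
  if needquote then '"' :: body ++ ['"'] else body

def args2cmd_py_alt (args : List String) (sep : String) : String :=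
  PySem.Str.join " " (args.map fun a => String.ofList (bQuote a.toList))

-- ===== PRECONDITION & SPEC =====
def Spec_args2cmd_py (args : List String) (sep : String) (out : String) : Prop := out = args2cmd_py_alt args sep
instance (args : List String) (sep : String) (out : String) : Decidable (Spec_args2cmd_py args sep out) := by unfold Spec_args2cmd_py; infer_instance

-- ===== CLAIM (what is proved, stated in full; the proofs are below) =====
def Claim_equal_args2cmd_py : Prop := ∀ (args : List String) (sep : String), Dom_args2cmd_py args sep → Spec_args2cmd_py args sep (args2cmd_py args sep)

-- ===== LEMMAS AND PROOFS =====

-- common characterisation of the escaping of one argument: F cs k = (emitted chars,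
-- final backslash-buffer length) of A's inner loop started with a buffer of k backslashes
def F : List Char → Nat → List Char × Nat
  | [], k => ([], k)
  | c :: cs, k =>
    if c = '\\' then F cs (k + 1)
    else if c = '"' then
      (List.replicate (k * 2) '\\' ++ ['\\', '"'] ++ (F cs 0).1, (F cs 0).2)
    else
      (List.replicate k '\\' ++ [c] ++ (F cs 0).1, (F cs 0).2)

theorem if_isEmpty_append (res bs : List Char) :
    (if bs.isEmpty then res else res ++ bs) = res ++ bs := by
  cases bs <;> simp

theorem aInner_eq (cs : List Char) : ∀ (res : List Char) (k : Nat),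
    aInner cs res (List.replicate k '\\')
      = (res ++ (F cs k).1, List.replicate (F cs k).2 '\\') := by
  induction cs with
  | nil => intro res k; simp [aInner, F]
  | cons c cs ih =>
    intro res k
    by_cases h1 : c = '\\'
    · have : List.replicate k '\\' ++ ['\\'] = List.replicate (k + 1) '\\' := by
        simp [List.replicate_succ']
      simp [aInner, F, h1, this, ih]
    · by_cases h2 : c = '"'
      · simp only [aInner, if_neg h1, h2, if_pos rfl, List.length_replicate]
        rw [show ([] : List Char) = List.replicate 0 '\\' from rfl, ih]
        simp [F, h2, List.append_assoc]
      · simp only [aInner, if_neg h1, if_neg h2, if_isEmpty_append]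
        rw [show ([] : List Char) = List.replicate 0 '\\' from rfl, ih]
        simp [F, h1, h2, List.append_assoc]

theorem F_snoc (c : Char) (cs : List Char) : ∀ (k : Nat),
    F (cs ++ [c]) k =
      if c = '\\' then ((F cs k).1, (F cs k).2 + 1)
      else if c = '"' then ((F cs k).1 ++ List.replicate ((F cs k).2 * 2) '\\' ++ ['\\', '"'], 0)
      else ((F cs k).1 ++ List.replicate (F cs k).2 '\\' ++ [c], 0) := by
  induction cs with
  | nil =>
    intro k
    by_cases h1 : c = '\\' <;> by_cases h2 : c = '"' <;> simp_all [F]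
  | cons c' cs ih =>
    intro k
    by_cases h1' : c' = '\\'
    · by_cases h1 : c = '\\' <;> by_cases h2 : c = '"' <;>
        simp_all [F]
    · by_cases h2' : c' = '"' <;>
        by_cases h1 : c = '\\' <;> by_cases h2 : c = '"' <;>
        simp_all [F]

theorem bLoop_acc (rcs : List Char) : ∀ (pieces : List (List Char)) (d : Bool),
    bLoop rcs pieces d = pieces ++ bLoop rcs [] d := by
  induction rcs with
  | nil => intro pieces d; simp [bLoop]
  | cons c r ih =>
    intro pieces d
    by_cases h1 : c = '"'
    · simp [bLoop, h1]; rw [ih, ih [_]]; simp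
    · by_cases h2 : c = '\\'
      · simp [bLoop, h1, h2]; rw [ih, ih [_]]; simp
      · simp [bLoop, h1, h2]; rw [ih, ih [_]]; simp

theorem bLoop_eq (rcs : List Char) : ∀ (d : Bool),
    (bLoop rcs [] d).reverse.flatten
      = (F rcs.reverse 0).1
        ++ List.replicate ((if d then 2 else 1) * (F rcs.reverse 0).2) '\\' := by
  induction rcs with
  | nil => intro d; simp [bLoop, F]
  | cons c r ih =>
    intro d
    have hs := F_snoc c r.reverse 0
    rw [List.reverse_cons]
    by_cases h1 : c = '"'
    · subst h1
      simp only [reduceIte] at hs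
      simp only [bLoop, reduceIte]
      rw [bLoop_acc, List.reverse_append, List.flatten_append, ih true, hs]
      simp [List.append_assoc, Nat.mul_comm]
    · by_cases h2 : c = '\\'
      · subst h2
        simp only [reduceIte] at hs
        simp only [bLoop, if_neg h1, reduceIte, List.nil_append]
        rw [bLoop_acc, List.reverse_append, List.flatten_append, ih d, hs]
        cases d
        · have hr : List.replicate (1 * ((F r.reverse 0).2 + 1)) '\\'
              = List.replicate (1 * (F r.reverse 0).2) '\\' ++ ['\\'] := by
            simp [List.replicate_succ']
          simp [hr, List.append_assoc, List.replicate_succ']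
        · have hr : List.replicate (2 * ((F r.reverse 0).2 + 1)) '\\'
              = List.replicate (2 * (F r.reverse 0).2) '\\' ++ ['\\', '\\'] := by
            rw [show 2 * ((F r.reverse 0).2 + 1) = 2 * (F r.reverse 0).2 + 2 by ring,
              List.replicate_add]
            rfl
          simp [hr, List.append_assoc]
      · simp only [bLoop, if_neg h1, if_neg h2]
        rw [bLoop_acc, List.reverse_append, List.flatten_append, ih false, hs]
        simp [h1, h2, List.append_assoc]

-- per-argument emission of A (what one iteration of the outer loop appends, after the separator)
def aPer (cs : List Char) : List Char :=
  let nq := cs.contains ' ' || cs.contains '\t' || cs.isEmpty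
  (if nq then ['"'] else [])
    ++ (F cs 0).1 ++ List.replicate (F cs 0).2 '\\'
    ++ (if nq then List.replicate (F cs 0).2 '\\' ++ ['"'] else [])

theorem aPer_eq_bQuote (cs : List Char) : aPer cs = bQuote cs := by
  have h := bLoop_eq cs.reverse
  simp only [List.reverse_reverse] at h
  simp only [aPer, bQuote]
  by_cases nq : (cs.contains ' ' || cs.contains '\t' || cs.isEmpty) = true
  · rw [nq, h true]
    simp only [eq_self_iff_true, if_true]
    rw [show (2 : Nat) * (F cs 0).2 = (F cs 0).2 + (F cs 0).2 from two_mul _, List.replicate_add]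
    simp only [List.append_assoc, List.cons_append, List.singleton_append, List.nil_append]
  · have nq' : (cs.contains ' ' || cs.contains '\t' || cs.isEmpty) = false := by
      simpa using nq
    rw [nq', h false]
    simp [List.append_assoc]

theorem F_emit_nil (cs : List Char) : ∀ k, (F cs k).1 = [] → (F cs k).2 = k + cs.length := by
  induction cs with
  | nil => intro k _; simp [F]
  | cons c cs ih =>
    intro k h
    by_cases h1 : c = '\\'
    · rw [show F (c :: cs) k = F cs (k + 1) from by simp [F, h1]] at h ⊢
      rw [ih (k + 1) h]
      simp [List.length_cons]
      omega
    · by_cases h2 : c = '"' <;> simp [F, h1, h2] at h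

theorem aPer_ne_nil (cs : List Char) : aPer cs ≠ [] := by
  simp only [aPer]
  by_cases nq : (cs.contains ' ' || cs.contains '\t' || cs.isEmpty) = true
  · rw [nq]; simp
  · have nq' : (cs.contains ' ' || cs.contains '\t' || cs.isEmpty) = false := by
      simpa using nq
    rw [nq']
    simp only [Bool.false_eq_true, if_false, List.nil_append, List.append_nil]
    intro h
    rw [List.append_eq_nil_iff] at h
    have hm := F_emit_nil cs 0 h.1
    have hm0 : (F cs 0).2 = 0 := by simpa using h.2
    have hlen : cs.length = 0 := by omega
    have hnil : cs = [] := List.length_eq_zero_iff.mp hlen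
    subst hnil
    simp at nq'

-- the string A builds after the first argument: each later argument is preceded by ' '
def joined : List String → List Char
  | [] => []
  | a :: rest => (' ' :: bQuote a.toList) ++ joined rest

theorem aOuter_step (arg : String) (rest : List String) (res : List Char) :
    aOuter (arg :: rest) res
      = aOuter rest ((if res.isEmpty then res else res ++ [' ']) ++ aPer arg.toList) := by
  have hin0 : ∀ res', aInner arg.toList res' []
      = (res' ++ (F arg.toList 0).1, List.replicate (F arg.toList 0).2 '\\') := by
    intro res'; simpa using aInner_eq arg.toList res' 0
  simp only [aOuter, aPer]
  by_cases nq : (arg.toList.contains ' ' || arg.toList.contains '\t' || arg.toList.isEmpty) = true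
  · rw [nq]
    simp only [eq_self_iff_true, if_true, hin0, List.append_assoc]
    rcases Nat.eq_zero_or_pos (F arg.toList 0).2 with hm | hm
    · simp only [hm, List.replicate_zero, List.isEmpty_nil, if_true, List.append_nil,
        List.nil_append, List.append_assoc, List.cons_append, List.singleton_append]
    · have hE : (List.replicate (F arg.toList 0).2 '\\').isEmpty = false := by
        obtain ⟨n, hn⟩ := Nat.exists_eq_succ_of_ne_zero (by omega : (F arg.toList 0).2 ≠ 0)
        rw [hn, List.replicate_succ]
        rfl
      simp only [hE, Bool.false_eq_true, if_false, List.append_assoc, List.cons_append,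
        List.singleton_append, List.nil_append, List.append_nil]
  · have nq' : (arg.toList.contains ' ' || arg.toList.contains '\t' || arg.toList.isEmpty) = false := by
      simpa using nq
    rw [nq']
    simp only [Bool.false_eq_true, if_false, hin0, List.append_assoc, List.nil_append,
      List.append_nil]
    rcases Nat.eq_zero_or_pos (F arg.toList 0).2 with hm | hm
    · simp only [hm, List.replicate_zero, List.isEmpty_nil, if_true, List.append_nil,
        List.nil_append, List.append_assoc, List.cons_append, List.singleton_append]
    · have hE : (List.replicate (F arg.toList 0).2 '\\').isEmpty = false := by
        obtain ⟨n, hn⟩ := Nat.exists_eq_succ_of_ne_zero (by omega : (F arg.toList 0).2 ≠ 0)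
        rw [hn, List.replicate_succ]
        rfl
      simp only [hE, Bool.false_eq_true, if_false, List.append_assoc, List.cons_append,
        List.singleton_append, List.nil_append, List.append_nil]

theorem aOuter_run (args : List String) : ∀ (res : List Char), res ≠ [] →
    aOuter args res = res ++ joined args := by
  induction args with
  | nil =>
    intro res _
    show aOuter [] res = res ++ joined []
    rw [show joined [] = [] from rfl, List.append_nil]
    rfl
  | cons a rest ih =>
    intro res hres
    rw [aOuter_step, if_neg (show ¬ (res.isEmpty = true) by simp [hres])]
    rw [ih (res ++ [' '] ++ aPer a.toList) (by simp), aPer_eq_bQuote]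
    simp [joined, List.append_assoc]

theorem joined_eq_join (rest : List String) :
    ∀ (a : String),
      bQuote a.toList ++ joined rest
        = PySem.Chars.join [' '] ((a :: rest).map (fun s => bQuote s.toList)) := by
  induction rest with
  | nil => intro a; simp [joined, PySem.Chars.join_singleton]
  | cons b rest ih =>
    intro a
    rw [show (a :: b :: rest).map (fun s => bQuote s.toList)
          = bQuote a.toList :: bQuote b.toList :: rest.map (fun s => bQuote s.toList) from rfl,
      PySem.Chars.join_cons_cons,
      show bQuote b.toList :: rest.map (fun s => bQuote s.toList)
          = (b :: rest).map (fun s => bQuote s.toList) from rfl,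
      ← ih b]
    simp [joined, List.append_assoc]

-- ===== VERDICT (by name: the statement is the Claim_ definition above) =====
theorem args2cmd_py_spec : Claim_equal_args2cmd_py := by
  intro args sep _
  unfold Spec_args2cmd_py args2cmd_py args2cmd_py_alt
  apply String.toList_injective
  rw [PySem.Str.toList_join, String.toList_ofList]
  cases args with
  | nil => simp [aOuter, PySem.Chars.join_nil]
  | cons a rest =>
    rw [show String.toList " " = [' '] from rfl]
    have h1 : aOuter (a :: rest) [] = bQuote a.toList ++ joined rest := by
      rw [aOuter_step]
      simp only [List.isEmpty_nil, if_true, List.nil_append]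
      rw [aOuter_run rest (aPer a.toList) (aPer_ne_nil a.toList), aPer_eq_bQuote]
    rw [h1, joined_eq_join rest a]
    congr 1
    simp [Function.comp, String.toList_ofList]
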